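-- pv_equiv track=rewrite | github.com/Vishwaflr/news-mcp | app/services/scraper_service.py | _is_paywall
-- ===== SOURCE A (Python) =====
-- def _is_paywall(html: str) -> bool:
--     """Detect paywall indicators in HTML"""
--     paywall_indicators = [
--         'subscribe to read',
--         'subscription required',
--         'premium content',
--         'sign in to continue',
--         'this article is for subscribers',
--         'continue reading with unlimited access',
--         'paywall',
--         'data-paywall',
--         'subscriber-only',
--         'premium-article'
--     ]
--
--     html_lower = html.lower()
--     return any(indicator in html_lower for indicator in paywall_indicators)
-- ===== SOURCE B (Python) =====
-- def _is_paywall(html: str) -> bool: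
--     """Detect paywall indicators in HTML via one left-to-right scan"""
--     paywall_indicators = [
--         'subscribe to read',
--         'subscription required',
--         'premium content',
--         'sign in to continue',
--         'this article is for subscribers',
--         'continue reading with unlimited access',
--         'paywall',
--         'data-paywall',
--         'subscriber-only',
--         'premium-article'
--     ]
--     s = html.lower()
--     for i in range(len(s)):
--         for ind in paywall_indicators:
--             if s.startswith(ind, i):
--                 return True
--     return False
-- ===== Notes on version B (the rewrite author's own statement) =====
-- stated objective: alternative
-- what changed: B makes a single left-to-right scan over the lowercased HTML, testing at each position whether any indicator starts there, instead of A's ten independent full substring membership scans.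
import Mathlib
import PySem

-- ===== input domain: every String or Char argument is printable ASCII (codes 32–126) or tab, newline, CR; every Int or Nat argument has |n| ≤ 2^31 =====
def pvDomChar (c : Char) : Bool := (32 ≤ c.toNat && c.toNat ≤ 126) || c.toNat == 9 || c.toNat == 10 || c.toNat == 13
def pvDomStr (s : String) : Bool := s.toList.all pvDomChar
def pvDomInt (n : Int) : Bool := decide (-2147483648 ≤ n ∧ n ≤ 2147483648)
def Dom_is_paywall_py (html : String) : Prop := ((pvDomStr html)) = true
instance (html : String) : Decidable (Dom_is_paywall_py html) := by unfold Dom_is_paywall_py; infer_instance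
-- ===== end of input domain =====

-- B changes the traversal (one scan over positions with a multi-pattern prefix test, instead of
-- ten independent substring scans); same return value everywhere, no speed claim.

-- ===== PORT A =====
def pvIndicators : List String :=
  [ "subscribe to read",
    "subscription required",
    "premium content",
    "sign in to continue",
    "this article is for subscribers",
    "continue reading with unlimited access",
    "paywall",
    "data-paywall",
    "subscriber-only",
    "premium-article" ]

def is_paywall_py (html : String) : Bool :=
  let html_lower := PySem.Str.lower html
  pvIndicators.any (fun indicator => PySem.Str.isIn indicator html_lower)

-- ===== PORT B =====
-- the same indicator list, as character lists (B scans character-wise)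
def pvIndChars : List (List Char) := pvIndicators.map String.toList

-- 'for i in range(len(s)): if any(s.startswith(ind, i) …)': structural recursion over suffixes
def pvScan (inds : List (List Char)) : List Char → Bool
  | [] => false
  | c :: rest => inds.any (fun p => p.isPrefixOf (c :: rest)) || pvScan inds rest

def is_paywall_py_alt (html : String) : Bool :=
  pvScan pvIndChars (PySem.Str.lower html).toList

-- ===== PRECONDITION & SPEC =====
def Spec_is_paywall_py (html : String) (out : Bool) : Prop := out = is_paywall_py_alt html
instance (html : String) (out : Bool) : Decidable (Spec_is_paywall_py html out) := by unfold Spec_is_paywall_py; infer_instance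

-- ===== CLAIM (what is proved, stated in full; the proofs are below) =====
def Claim_equal_is_paywall_py : Prop := ∀ (html : String), Dom_is_paywall_py html → Spec_is_paywall_py html (is_paywall_py html)

-- ===== LEMMAS AND PROOFS =====

-- B's scan finds exactly the infix occurrences of the (nonempty) patterns
theorem pvScan_iff (inds : List (List Char)) (h : ∀ p ∈ inds, p ≠ [])
    (l : List Char) : pvScan inds l = true ↔ ∃ p ∈ inds, p <:+: l := by
  induction l with
  | nil =>
      simp only [pvScan, Bool.false_eq_true, false_iff, not_exists]
      rintro p ⟨hp, hpf⟩
      exact h p hp (List.eq_nil_of_infix_nil hpf)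
  | cons c rest ih =>
      simp [pvScan, ih, List.isPrefixOf_iff_prefix, List.infix_cons_iff]
      constructor
      · rintro (⟨p, hp, hpre⟩ | ⟨p, hp, hinf⟩)
        · exact ⟨p, hp, Or.inl hpre⟩
        · exact ⟨p, hp, Or.inr hinf⟩
      · rintro ⟨p, hp, hpre | hinf⟩
        · exact Or.inl ⟨p, hp, hpre⟩
        · exact Or.inr ⟨p, hp, hinf⟩

theorem pvInds_ne_nil : ∀ p ∈ pvIndChars, p ≠ [] := by decide

-- ===== VERDICT (by name: the statement is the Claim_ definition above) =====
theorem is_paywall_py_spec : Claim_equal_is_paywall_py := by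
  intro html _
  unfold Spec_is_paywall_py is_paywall_py is_paywall_py_alt
  rw [Bool.eq_iff_iff]
  rw [pvScan_iff pvIndChars pvInds_ne_nil]
  simp only [List.any_eq_true, PySem.Str.isIn_iff_infix, pvIndChars, List.mem_map]
  constructor
  · rintro ⟨ind, hind, hinf⟩
    exact ⟨ind.toList, ⟨ind, hind, rfl⟩, hinf⟩
  · rintro ⟨p, ⟨ind, hind, rfl⟩, hinf⟩
    exact ⟨ind, hind, hinf⟩
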